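-- pv_equiv track=rewrite | github.com/richckov/neuro-tutor | utils.py | replace_fractions
-- ===== SOURCE A (Python) =====
-- def replace_fractions(text: str) -> str:
--     fraction_map = {
--         '1/2': '½', '1/3': '⅓', '2/3': '⅔',
--         '1/4': '¼', '3/4': '¾',
--         '1/5': '⅕', '2/5': '⅖', '3/5': '⅗', '4/5': '⅘',
--         '1/6': '⅙', '5/6': '⅚',
--         '1/7': '⅐', '1/8': '⅛', '3/8': '⅜', '5/8': '⅝', '7/8': '⅞',
--         '1/9': '⅑', '1/10': '⅒',
--     }
--
--     for frac, symbol in fraction_map.items():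
--         text = text.replace(frac, symbol)
--     return text
-- ===== SOURCE B (Python) =====
-- def replace_fractions(text: str) -> str:
--     keys = '1/2 1/3 2/3 1/4 3/4 1/5 2/5 3/5 4/5 1/6 5/6 1/7 1/8 3/8 5/8 7/8 1/9 1/10'.split()
--     fraction_map = dict(zip(keys, '½⅓⅔¼¾⅕⅖⅗⅘⅙⅚⅐⅛⅜⅝⅞⅑⅒'))
--     out = []
--     i = 0
--     n = len(text)
--     while i < n:
--         if text[i:i + 4] == '1/10':
--             out.append('⅒')
--             i += 4
--             continue
--         sym = fraction_map.get(text[i:i + 3])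
--         if sym is not None:
--             out.append(sym)
--             i += 3
--         else:
--             out.append(text[i])
--             i += 1
--     return ''.join(out)
-- ===== Notes on version B (the rewrite author's own statement) =====
-- stated objective: alternative
-- what changed: Replaces the 18 sequential full-text str.replace scans with a single left-to-right scan that matches the (unique, prefix-free, order-compatible) fraction keys at each position and emits output pieces once; asymptotically one pass instead of 18, though CPython's C-level str.replace makes the interpreted loop slower in wall time.
import Mathlib
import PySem

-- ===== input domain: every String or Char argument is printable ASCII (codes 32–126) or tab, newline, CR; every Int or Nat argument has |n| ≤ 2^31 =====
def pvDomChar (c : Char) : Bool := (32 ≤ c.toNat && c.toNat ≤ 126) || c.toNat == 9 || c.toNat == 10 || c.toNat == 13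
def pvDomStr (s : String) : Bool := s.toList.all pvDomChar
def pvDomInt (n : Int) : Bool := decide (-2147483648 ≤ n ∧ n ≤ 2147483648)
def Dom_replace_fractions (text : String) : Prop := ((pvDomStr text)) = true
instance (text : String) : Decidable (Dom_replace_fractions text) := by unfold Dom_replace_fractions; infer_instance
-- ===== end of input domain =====

-- B replaces A's 18 sequential full-text str.replace passes with one left-to-right scan that
-- matches a fraction key at each position and emits each output piece once (alternative algorithm).

-- ===== PORT A =====
-- the dict literal of A, as an insertion-ordered association list
def fracTable : List (String × String) :=
  [("1/2", "½"), ("1/3", "⅓"), ("2/3", "⅔"),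
   ("1/4", "¼"), ("3/4", "¾"),
   ("1/5", "⅕"), ("2/5", "⅖"), ("3/5", "⅗"), ("4/5", "⅘"),
   ("1/6", "⅙"), ("5/6", "⅚"),
   ("1/7", "⅐"), ("1/8", "⅛"), ("3/8", "⅜"), ("5/8", "⅝"), ("7/8", "⅞"),
   ("1/9", "⅑"), ("1/10", "⅒")]

-- for frac, symbol in fraction_map.items(): text = text.replace(frac, symbol)
def replace_fractions (text : String) : String :=
  fracTable.foldl (fun t p => PySem.Str.replace t p.1 p.2) text

-- ===== PORT B =====
-- B's fraction_map at character level (each glyph is a single character)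
def fracMapChars : List (List Char × Char) :=
  [(['1','/','2'], '½'), (['1','/','3'], '⅓'), (['2','/','3'], '⅔'),
   (['1','/','4'], '¼'), (['3','/','4'], '¾'),
   (['1','/','5'], '⅕'), (['2','/','5'], '⅖'), (['3','/','5'], '⅗'), (['4','/','5'], '⅘'),
   (['1','/','6'], '⅙'), (['5','/','6'], '⅚'),
   (['1','/','7'], '⅐'), (['1','/','8'], '⅛'), (['3','/','8'], '⅜'), (['5','/','8'], '⅝'), (['7','/','8'], '⅞'),
   (['1','/','9'], '⅑'), (['1','/','1','0'], '⅒')]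

-- the while loop of Source B: try the 4-char key text[i:i+4], then the 3-char lookup text[i:i+3],
-- else copy one character; pieces are emitted once, left to right
def scanFrac : List Char → List Char
  | [] => []
  | c :: t =>
    if (c :: t).take 4 = ['1','/','1','0'] then
      '⅒' :: scanFrac (t.drop 3)
    else
      match List.lookup ((c :: t).take 3) fracMapChars with
      | some g => g :: scanFrac (t.drop 2)
      | none => c :: scanFrac t
termination_by l => l.length
decreasing_by
  · simp only [List.length_cons, List.length_drop]; omega
  · simp only [List.length_cons, List.length_drop]; omega
  · simp only [List.length_cons]; omega

def replace_fractions_alt (text : String) : String :=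
  String.ofList (scanFrac text.toList)

-- ===== PRECONDITION & SPEC =====
def Spec_replace_fractions (text : String) (out : String) : Prop := out = replace_fractions_alt text
instance (text : String) (out : String) : Decidable (Spec_replace_fractions text out) := by unfold Spec_replace_fractions; infer_instance

-- ===== CLAIM (what is proved, stated in full; the proofs are below) =====
def Claim_equal_replace_fractions : Prop := ∀ (text : String), Dom_replace_fractions text → Spec_replace_fractions text (replace_fractions text)

-- ===== LEMMAS AND PROOFS =====

-- A's chain of replace passes, at character level
def chainL (ps : List (List Char × Char)) (l : List Char) : List Char :=
  ps.foldl (fun t p => PySem.Chars.replace t p.1 [p.2]) l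

-- "no key of the table is a prefix of l"
def NoKeyHead (l : List Char) : Prop := ∀ p ∈ fracMapChars, ¬ p.1 <+: l

-- "k cannot match at any offset strictly inside p, whatever follows p"
def NoClash (k p : List Char) : Prop :=
  ∀ o < p.length, ¬ k <+: p.drop o ∧ ¬ p.drop o <+: k

-- ---- equations for PySem.Chars.replace (nonempty pattern) ----

theorem go_zero (old new l acc : List Char) :
    PySem.Chars.replace.go old new 0 l acc = acc.reverse ++ l := rfl

theorem go_succ_nil (old new acc : List Char) (fuel : Nat) :
    PySem.Chars.replace.go old new (fuel + 1) [] acc = acc.reverse := rfl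

theorem go_succ_cons (old new acc : List Char) (fuel : Nat) (c : Char) (t : List Char) :
    PySem.Chars.replace.go old new (fuel + 1) (c :: t) acc =
      if old.isPrefixOf (c :: t) then
        PySem.Chars.replace.go old new fuel ((c :: t).drop old.length) (new.reverse ++ acc)
      else
        PySem.Chars.replace.go old new fuel t (c :: acc) := rfl

theorem go_acc (old new : List Char) (ho : old ≠ []) :
    ∀ (fuel : Nat) (l acc : List Char), l.length ≤ fuel →
      PySem.Chars.replace.go old new fuel l acc =
        acc.reverse ++ PySem.Chars.replace.go old new l.length l [] := by
  intro fuel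
  induction fuel using Nat.strong_induction_on with
  | _ fuel ih =>
    intro l acc h
    match fuel with
    | 0 =>
      have : l = [] := List.eq_nil_of_length_eq_zero (Nat.le_zero.mp h)
      subst this; simp [go_zero]
    | m + 1 =>
      cases l with
      | nil => simp [go_succ_nil, go_zero]
      | cons c t =>
        have hone : 1 ≤ old.length := by
          cases old with
          | nil => exact absurd rfl ho
          | cons _ _ => simp
        have hc : (c :: t).length = t.length + 1 := rfl
        have ht : t.length ≤ m := by simp only [List.length_cons] at h; omega
        by_cases hp : old.isPrefixOf (c :: t)
        · have hlen : ((c :: t).drop old.length).length ≤ m := by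
            simp only [List.length_drop, List.length_cons]; omega
          have hlen2 : ((c :: t).drop old.length).length ≤ t.length := by
            simp only [List.length_drop, List.length_cons]; omega
          rw [go_succ_cons, if_pos hp, ih m (by omega) _ _ hlen]
          conv_rhs => rw [hc, go_succ_cons, if_pos hp]
          rw [ih t.length (by omega) _ _ hlen2]
          simp
        · rw [go_succ_cons, if_neg hp, ih m (by omega) _ _ ht]
          conv_rhs => rw [hc, go_succ_cons, if_neg hp]
          rw [ih t.length (by omega) t [c] (le_refl _)]
          simp

theorem rep_nil (old new : List Char) (ho : old ≠ []) :
    PySem.Chars.replace [] old new = [] := by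
  unfold PySem.Chars.replace
  rw [if_neg (by simpa using ho)]
  simp [go_zero]

theorem rep_cons_neg (old new : List Char) (c : Char) (t : List Char)
    (ho : old ≠ []) (h : ¬ old <+: (c :: t)) :
    PySem.Chars.replace (c :: t) old new = c :: PySem.Chars.replace t old new := by
  have hb : old.isPrefixOf (c :: t) = false := by
    rw [← Bool.not_eq_true, List.isPrefixOf_iff_prefix]; exact h
  unfold PySem.Chars.replace
  rw [if_neg (by simpa using ho), if_neg (by simpa using ho)]
  have : (c :: t).length = t.length + 1 := rfl
  rw [this, go_succ_cons, hb]
  simp only [Bool.false_eq_true, if_false]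
  rw [go_acc old new ho t.length t [c] (le_refl _)]
  simp

theorem rep_pos (old new l : List Char) (ho : old ≠ []) (h : old <+: l) :
    PySem.Chars.replace l old new = new ++ PySem.Chars.replace (l.drop old.length) old new := by
  have hb : old.isPrefixOf l = true := List.isPrefixOf_iff_prefix.mpr h
  have hone : 1 ≤ old.length := by
    cases old with
    | nil => exact absurd rfl ho
    | cons _ _ => simp
  cases l with
  | nil =>
    exact absurd (List.prefix_nil.mp h) ho
  | cons c t =>
    unfold PySem.Chars.replace
    rw [if_neg (by simpa using ho), if_neg (by simpa using ho)]
    have hc : (c :: t).length = t.length + 1 := rfl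
    rw [hc, go_succ_cons, hb]
    simp only [if_true]
    have hlen : ((c :: t).drop old.length).length ≤ t.length := by
      simp only [List.length_drop, List.length_cons]; omega
    rw [go_acc old new ho t.length _ _ hlen]
    simp

-- ---- the first n characters of a replace result: unchanged, or containing the glyph ----

theorem take_or (old : List Char) (g : Char) (ho : old ≠ []) :
    ∀ (N : Nat) (l : List Char), l.length ≤ N → ∀ (n : Nat),
      (PySem.Chars.replace l old [g]).take n = l.take n ∨
        g ∈ (PySem.Chars.replace l old [g]).take n := by
  intro N
  induction N with
  | zero =>
    intro l h n
    have : l = [] := List.eq_nil_of_length_eq_zero (Nat.le_zero.mp h)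
    subst this; left; rw [rep_nil old [g] ho]
  | succ M ih =>
    intro l h n
    cases l with
    | nil => left; rw [rep_nil old [g] ho]
    | cons c t =>
      by_cases hp : old <+: (c :: t)
      · rw [rep_pos old [g] _ ho hp]
        cases n with
        | zero => left; simp
        | succ m => right; simp
      · rw [rep_cons_neg old [g] c t ho hp]
        cases n with
        | zero => left; simp
        | succ m =>
          have ht : t.length ≤ M := by simp only [List.length_cons] at h; omega
          rcases ih t ht m with heq | hmem
          · left; simp [List.take_succ_cons, heq]
          · right; simp [List.take_succ_cons]; right; exact hmem

-- ---- finite facts about the literal table (checked by decide) ----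

theorem keysNE : ∀ p ∈ fracMapChars, p.1 ≠ [] := by decide

theorem glyphFree : ∀ p ∈ fracMapChars, ∀ q ∈ fracMapChars, p.2 ∉ q.1 := by decide

theorem orderOK : ∀ i < fracMapChars.length, ∀ j < i,
    NoClash (fracMapChars[j]!).1 (fracMapChars[i]!).1 := by
  simp only [NoClash]; decide

theorem glyphNoClash : ∀ p ∈ fracMapChars, ∀ q ∈ fracMapChars, NoClash p.1 [q.2] := by
  simp only [NoClash]; decide

-- ---- NoKeyHead is preserved by every replace pass of the chain ----

theorem nkh_rep (k : List Char) (g : Char) (hk : (k, g) ∈ fracMapChars) (s : List Char)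
    (hs : NoKeyHead s) : NoKeyHead (PySem.Chars.replace s k [g]) := by
  intro q hq hpref
  have hne : k ≠ [] := keysNE (k, g) hk
  have htake : (PySem.Chars.replace s k [g]).take q.1.length = q.1 :=
    (List.prefix_iff_eq_take.mp hpref).symm
  rcases take_or k g hne s.length s (le_refl _) q.1.length with heq | hmem
  · have : q.1 <+: s := by
      rw [htake] at heq
      exact heq ▸ List.take_prefix q.1.length s
    exact hs q hq this
  · rw [htake] at hmem
    exact glyphFree (k, g) hk q hq hmem

-- ---- chain passes a safe head character through unchanged ----

theorem chain_cons : ∀ (ps : List (List Char × Char)), (∀ p ∈ ps, p ∈ fracMapChars) →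
    ∀ (c : Char) (t : List Char), NoKeyHead (c :: t) →
      chainL ps (c :: t) = c :: chainL ps t := by
  intro ps
  induction ps with
  | nil => intro _ c t _; rfl
  | cons p ps' ih =>
    intro hmem c t hnkh
    have hp : p ∈ fracMapChars := hmem p (by simp)
    have hne : p.1 ≠ [] := keysNE p hp
    have hnp : ¬ p.1 <+: (c :: t) := hnkh p hp
    have hstep : PySem.Chars.replace (c :: t) p.1 [p.2] = c :: PySem.Chars.replace t p.1 [p.2] :=
      rep_cons_neg p.1 [p.2] c t hne hnp
    have hnkh' : NoKeyHead (PySem.Chars.replace (c :: t) p.1 [p.2]) :=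
      nkh_rep p.1 p.2 (by cases p; exact hp) (c :: t) hnkh
    rw [hstep] at hnkh'
    show chainL ps' (PySem.Chars.replace (c :: t) p.1 [p.2]) = _
    rw [hstep]
    exact ih (fun q hq => hmem q (by simp [hq])) c (PySem.Chars.replace t p.1 [p.2]) hnkh'

-- ---- a replace pass commutes past a clash-free prefix ----

theorem nc_tail (k : List Char) (c : Char) (p : List Char) (h : NoClash k (c :: p)) :
    NoClash k p := by
  intro o ho
  have := h (o + 1) (by simp; omega)
  simpa using this

theorem prefix_append_cases (k p X : List Char) (h : k <+: p ++ X) : k <+: p ∨ p <+: k := by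
  rcases Nat.lt_or_ge p.length k.length with hlt | hle
  · right; exact List.prefix_of_prefix_length_le (List.prefix_append p X) h (Nat.le_of_lt hlt)
  · left; exact List.prefix_of_prefix_length_le h (List.prefix_append p X) hle

theorem gcomm (k : List Char) (g : List Char) (hk : k ≠ []) :
    ∀ (p X : List Char), NoClash k p →
      PySem.Chars.replace (p ++ X) k g = p ++ PySem.Chars.replace X k g := by
  intro p
  induction p with
  | nil => intro X _; simp
  | cons c p' ih =>
    intro X hnc
    have h0 : ¬ k <+: (c :: p') ∧ ¬ (c :: p') <+: k := by
      simpa using hnc 0 (by simp)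
    have hnp : ¬ k <+: (c :: p') ++ X := by
      intro hpref
      rcases prefix_append_cases k (c :: p') X hpref with h | h
      · exact h0.1 h
      · exact h0.2 h
    rw [show ((c :: p') ++ X) = c :: (p' ++ X) by simp,
        rep_cons_neg k g c (p' ++ X) hk hnp, ih X (nc_tail k c p' hnc)]
    simp

-- chain version of gcomm
theorem ch_comm (pre : List Char) :
    ∀ (ps : List (List Char × Char)), (∀ p ∈ ps, NoClash p.1 pre ∧ p.1 ≠ []) →
      ∀ (t : List Char), chainL ps (pre ++ t) = pre ++ chainL ps t := by
  intro ps
  induction ps with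
  | nil => intro _ t; rfl
  | cons p ps' ih =>
    intro h t
    have hp := h p (by simp)
    show chainL ps' (PySem.Chars.replace (pre ++ t) p.1 [p.2]) = _
    rw [gcomm p.1 [p.2] hp.2 pre t hp.1]
    exact ih (fun q hq => h q (by simp [hq])) (PySem.Chars.replace t p.1 [p.2])

theorem chainL_nil : ∀ (ps : List (List Char × Char)), (∀ p ∈ ps, p.1 ≠ []) →
    chainL ps [] = [] := by
  intro ps
  induction ps with
  | nil => intro _; rfl
  | cons p ps' ih =>
    intro h
    show chainL ps' (PySem.Chars.replace [] p.1 [p.2]) = []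
    rw [rep_nil p.1 [p.2] (h p (by simp))]
    exact ih (fun q hq => h q (by simp [hq]))

-- ---- the chain on a string starting with the i-th key ----

theorem chain_match (i : Nat) (hi : i < fracMapChars.length) (t : List Char) :
    chainL fracMapChars ((fracMapChars[i]).1 ++ t) =
      (fracMapChars[i]).2 :: chainL fracMapChars t := by
  have hsplit : fracMapChars = fracMapChars.take i ++ fracMapChars[i] :: fracMapChars.drop (i + 1) := by
    rw [List.getElem_cons_drop, List.take_append_drop]
  set k := (fracMapChars[i]).1 with hk
  set g := (fracMapChars[i]).2 with hg
  have hkmem : fracMapChars[i] ∈ fracMapChars := List.getElem_mem hi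
  have hkne : k ≠ [] := keysNE _ hkmem
  have hpre : ∀ p ∈ fracMapChars.take i, NoClash p.1 k ∧ p.1 ≠ [] := by
    intro p hp
    obtain ⟨j, hj, hpj⟩ := List.mem_iff_getElem.mp hp
    have hj' : j < i := by
      have := hj; simp [List.length_take] at this; omega
    have hpj' : p = fracMapChars[j] := by
      rw [← hpj, List.getElem_take]
    constructor
    · have := orderOK i hi j hj'
      rw [getElem!_pos fracMapChars i hi, getElem!_pos fracMapChars j (hj'.trans hi)] at this
      rw [hpj']; exact this
    · exact keysNE p (hpj' ▸ List.getElem_mem (hj'.trans hi))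
  have hpost : ∀ p ∈ fracMapChars.drop (i + 1), NoClash p.1 [g] ∧ p.1 ≠ [] := by
    intro p hp
    have hpm : p ∈ fracMapChars := List.mem_of_mem_drop hp
    exact ⟨glyphNoClash p hpm fracMapChars[i] hkmem, keysNE p hpm⟩
  have hfold : ∀ l, chainL fracMapChars l =
      chainL (fracMapChars.drop (i + 1))
        (PySem.Chars.replace (chainL (fracMapChars.take i) l) k [g]) := by
    intro l
    conv_lhs => rw [hsplit]
    simp only [chainL]
    rw [List.foldl_append, List.foldl_cons]
  rw [hfold (k ++ t), hfold t]
  rw [ch_comm k (fracMapChars.take i) hpre t]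
  rw [rep_pos k [g] (k ++ chainL (fracMapChars.take i) t) hkne (List.prefix_append k _)]
  rw [List.drop_left]
  rw [show ([g] ++ PySem.Chars.replace (chainL (fracMapChars.take i) t) k [g]) =
        [g] ++ PySem.Chars.replace (chainL (fracMapChars.take i) t) k [g] from rfl]
  rw [show (g :: chainL (fracMapChars.drop (i+1)) (PySem.Chars.replace (chainL (fracMapChars.take i) t) k [g])) =
        [g] ++ chainL (fracMapChars.drop (i+1)) (PySem.Chars.replace (chainL (fracMapChars.take i) t) k [g]) from rfl]
  exact ch_comm [g] (fracMapChars.drop (i + 1)) hpost _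

-- ---- looking up a key, and failure of lookup means no key at the head ----

theorem lk_mem (k : List Char) (g : Char) (m : List (List Char × Char))
    (h : List.lookup k m = some g) : (k, g) ∈ m := by
  induction m with
  | nil => simp [List.lookup] at h
  | cons p r ih =>
    rw [List.lookup] at h
    by_cases hk : k == p.1
    · simp [hk] at h; simp at hk; cases p; simp_all
    · simp [hk] at h; right; exact ih h

theorem nkh_of_lookup_none (c : Char) (t : List Char)
    (h4 : (c :: t).take 4 ≠ ['1','/','1','0'])
    (h3 : List.lookup ((c :: t).take 3) fracMapChars = none) :
    NoKeyHead (c :: t) := by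
  intro p hp hpref
  rw [List.lookup_eq_none_iff] at h3
  have hcase : p.1.length = 3 ∨ (p.1.length = 4 ∧ p.1 = ['1','/','1','0']) := by
    fin_cases hp <;> simp
  rcases hcase with h3l | ⟨h4l, hkey⟩
  · have he : (c :: t).take 3 = p.1 := by
      rw [← h3l]; exact (List.prefix_iff_eq_take.mp hpref).symm
    have hb := h3 p hp
    rw [he] at hb
    simp at hb
  · have he : (c :: t).take 4 = p.1 := by
      rw [← h4l]; exact (List.prefix_iff_eq_take.mp hpref).symm
    exact h4 (he.trans hkey)

-- ---- the main induction: A's chain equals B's scan ----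

theorem chain_eq_scan : ∀ (N : Nat) (l : List Char), l.length ≤ N →
    chainL fracMapChars l = scanFrac l := by
  intro N
  induction N with
  | zero =>
    intro l h
    have : l = [] := List.eq_nil_of_length_eq_zero (Nat.le_zero.mp h)
    subst this
    rw [chainL_nil fracMapChars keysNE, scanFrac]
  | succ M ih =>
    intro l h
    cases l with
    | nil => rw [chainL_nil fracMapChars keysNE, scanFrac]
    | cons c t =>
      have hlt : t.length ≤ M := by simp only [List.length_cons] at h; omega
      by_cases h4 : (c :: t).take 4 = ['1','/','1','0']
      · have hsplit : c :: t = ['1','/','1','0'] ++ (c :: t).drop 4 := by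
          conv_lhs => rw [← List.take_append_drop 4 (c :: t)]
          rw [h4]
        have h17 : (17 : Nat) < fracMapChars.length := by decide
        have hkey : (fracMapChars[17]'h17).1 = ['1','/','1','0'] := rfl
        have hg : (fracMapChars[17]'h17).2 = '⅒' := rfl
        rw [scanFrac]
        rw [if_pos h4]
        conv_lhs => rw [hsplit]
        rw [← hkey, chain_match 17 h17 ((c :: t).drop 4), hg]
        have hdrop : (c :: t).drop 4 = t.drop 3 := rfl
        rw [hdrop, ih (t.drop 3) (by simp only [List.length_drop]; omega)]
      · rw [scanFrac, if_neg h4]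
        cases hl : List.lookup ((c :: t).take 3) fracMapChars with
        | some g =>
          have hmem : ((c :: t).take 3, g) ∈ fracMapChars := lk_mem _ _ _ hl
          obtain ⟨i, hi, heq⟩ := List.mem_iff_getElem.mp hmem
          have hk1 : (fracMapChars[i]'hi).1 = (c :: t).take 3 := by rw [heq]
          have hk2 : (fracMapChars[i]'hi).2 = g := by rw [heq]
          conv_lhs =>
            rw [show c :: t = (c :: t).take 3 ++ (c :: t).drop 3 from
                  (List.take_append_drop 3 (c :: t)).symm, ← hk1]
          rw [chain_match i hi, hk2]
          rw [show (c :: t).drop 3 = t.drop 2 from rfl,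
              ih (t.drop 2) (by simp only [List.length_drop]; omega)]
        | none =>
          have hnkh := nkh_of_lookup_none c t h4 hl
          rw [chain_cons fracMapChars (fun p hp => hp) c t hnkh, ih t hlt]

-- ---- bridging String-level A to the character level ----

theorem foldl_toList : ∀ (ps : List (String × String)) (s : String),
    (ps.foldl (fun t p => PySem.Str.replace t p.1 p.2) s).toList =
      (ps.map (fun p => (p.1.toList, p.2.toList))).foldl
        (fun t p => PySem.Chars.replace t p.1 p.2) s.toList := by
  intro ps
  induction ps with
  | nil => intro s; rfl
  | cons p ps' ih =>
    intro s
    simp only [List.foldl_cons, List.map_cons]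
    rw [ih, PySem.Str.toList_replace]

theorem charfold_eq_chainL : ∀ (qs : List (List Char × Char)) (l : List Char),
    ((qs.map (fun p => (p.1, [p.2]))).foldl (fun t p => PySem.Chars.replace t p.1 p.2) l) =
      chainL qs l := by
  intro qs
  induction qs with
  | nil => intro l; rfl
  | cons q qs' ih => intro l; simp only [List.map_cons, List.foldl_cons, chainL] at *; rw [ih]

theorem tables_agree :
    fracTable.map (fun p => (p.1.toList, p.2.toList)) =
      fracMapChars.map (fun p => (p.1, [p.2])) := by decide

-- ===== VERDICT (by name: the statement is the Claim_ definition above) =====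
theorem replace_fractions_spec : Claim_equal_replace_fractions := by
  intro text _
  unfold Spec_replace_fractions replace_fractions replace_fractions_alt
  apply String.toList_inj.mp
  rw [foldl_toList, tables_agree, charfold_eq_chainL,
      chain_eq_scan text.toList.length text.toList (le_refl _)]
  rw [String.toList_ofList]
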